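-- pv_equiv track=rewrite | github.com/alvaro-fullstack/Entrevista | ultron_proyect/solvers.py | solve_word_search
-- ===== SOURCE A (Python) =====
-- INFINITY_STONES = ["SPACE", "MIND", "REALITY", "TIME", "POWER", "SOUL"]
--
-- def solve_word_search(data):
--     matrix = data.get('matrix', [])
--     found = []
--
--     rows = ["".join(r) for r in matrix]
--     cols = ["".join(c) for c in zip(*matrix)]
--     search_space = rows + cols
--
--     for stone in INFINITY_STONES:
--         for line in search_space:
--             if stone in line:
--                 found.append(stone)
--                 break
--
--     return {"solution": found}
-- ===== SOURCE B (Python) =====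
-- INFINITY_STONES = ["SPACE", "MIND", "REALITY", "TIME", "POWER", "SOUL"]
--
-- def solve_word_search(data):
--     matrix = data.get('matrix', [])
--     rows = ["".join(r) for r in matrix]
--     cols = ["".join(c) for c in zip(*matrix)]
--     lengths = {len(s) for s in INFINITY_STONES}
--     grams = set()
--     for line in rows + cols:
--         for k in lengths:
--             for i in range(len(line) - k + 1):
--                 grams.add(line[i:i + k])
--     return {"solution": [s for s in INFINITY_STONES if s in grams]}
-- ===== Notes on version B (the rewrite author's own statement) =====
-- stated objective: alternative
-- what changed: Replaces A's per-stone substring scans over the lines by an n-gram index: one pass enumerates every substring of stone length from each line into a set, then the stones are filtered by membership in that set.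
import Mathlib
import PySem

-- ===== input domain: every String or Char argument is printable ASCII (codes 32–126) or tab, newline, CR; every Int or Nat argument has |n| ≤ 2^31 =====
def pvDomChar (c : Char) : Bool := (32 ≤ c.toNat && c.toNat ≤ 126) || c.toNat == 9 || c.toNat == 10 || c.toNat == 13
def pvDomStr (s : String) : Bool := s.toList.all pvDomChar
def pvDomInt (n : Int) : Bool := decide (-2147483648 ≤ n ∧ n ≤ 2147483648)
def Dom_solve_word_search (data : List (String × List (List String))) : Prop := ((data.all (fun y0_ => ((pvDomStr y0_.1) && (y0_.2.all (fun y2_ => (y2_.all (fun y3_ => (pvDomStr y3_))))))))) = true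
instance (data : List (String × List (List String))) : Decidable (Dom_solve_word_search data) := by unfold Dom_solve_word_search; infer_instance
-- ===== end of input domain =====

-- B replaces A's per-stone substring scans by an n-gram index: one pass over the lines
-- collects every substring whose length is a stone length into a set, then the stones are
-- filtered by membership in that set (return value only; no mutation).

-- ===== PORT A =====
def INFINITY_STONES : List String := ["SPACE", "MIND", "REALITY", "TIME", "POWER", "SOUL"]

-- zip(*matrix): columns up to the shortest row (semantics of the zip builtin)
def pyZipStar (m : List (List String)) : List (List String) :=
  match m with
  | [] => []
  | r0 :: _ =>
    let n := m.foldl (fun acc r => min acc r.length) r0.length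
    (List.range n).map (fun j => m.map (fun r => r.getD j ""))

-- rows + cols, identical lines of both Python sources
def pvSearchSpace (data : List (String × List (List String))) : List String :=
  let matrix := (PySem.Dict.mk data).getD "matrix" []
  let rows := matrix.map (fun r => PySem.Str.join "" r)
  let cols := (pyZipStar matrix).map (fun c => PySem.Str.join "" c)
  rows ++ cols

-- A's inner 'for line in search_space: if stone in line: append; break'
def pvScanA (stone : String) : List String → Bool
  | [] => false
  | line :: rest => if PySem.Str.isIn stone line then true else pvScanA stone rest

def solve_word_search (data : List (String × List (List String))) : List (String × List String) :=
  let searchSpace := pvSearchSpace data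
  let found := INFINITY_STONES.foldl
    (fun acc stone => if pvScanA stone searchSpace then acc ++ [stone] else acc) []
  [("solution", found)]

-- ===== PORT B =====
def solve_word_search_alt (data : List (String × List (List String))) : List (String × List String) :=
  let searchSpace := pvSearchSpace data
  let lens : PySem.Set Int := PySem.Set.ofList (INFINITY_STONES.map (fun s => PySem.Str.len s))
  let grams : PySem.Set String := searchSpace.foldl
    (fun g line => lens.foldl
      (fun g k => (PySem.List.pyRange 0 (PySem.Str.len line - k + 1) 1).foldl
        (fun g i => PySem.Set.add g (PySem.Str.slice line (some i) (some (i + k)))) g) g)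
    PySem.Set.empty
  [("solution", INFINITY_STONES.filter (fun s => PySem.Set.contains grams s))]

-- ===== PRECONDITION & SPEC =====
def Spec_solve_word_search (data : List (String × List (List String))) (out : List (String × List String)) : Prop := out = solve_word_search_alt data
instance (data : List (String × List (List String))) (out : List (String × List String)) : Decidable (Spec_solve_word_search data out) := by unfold Spec_solve_word_search; infer_instance

-- ===== CLAIM =====
def Claim_equal_solve_word_search : Prop := ∀ (data : List (String × List (List String))), Dom_solve_word_search data → Spec_solve_word_search data (solve_word_search data)

-- ===== LEMMAS AND PROOFS =====

lemma pvScanA_eq_any (stone : String) (lines : List String) :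
    pvScanA stone lines = lines.any (fun l => PySem.Str.isIn stone l) := by
  induction lines with
  | nil => rfl
  | cons l rest ih => by_cases h : PySem.Str.isIn stone l = true <;> simp [pvScanA, ih]

lemma foldl_append_if_eq_filter (p : String → Bool) (stones : List String) (acc : List String) :
    stones.foldl (fun acc st => if p st then acc ++ [st] else acc) acc
      = acc ++ stones.filter p := by
  induction stones generalizing acc with
  | nil => simp
  | cons st rest ih => by_cases h : p st = true <;> simp [h, ih]

-- membership through a fold whose step adds elements satisfying P
lemma mem_foldl_step {α : Type} (F : PySem.Set String → α → PySem.Set String)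
    (P : α → String → Prop)
    (hF : ∀ s a x, x ∈ F s a ↔ x ∈ s ∨ P a x)
    (l : List α) (s : PySem.Set String) (x : String) :
    x ∈ l.foldl F s ↔ x ∈ s ∨ ∃ a ∈ l, P a x := by
  induction l generalizing s with
  | nil => simp
  | cons a rest ih =>
    simp only [List.foldl_cons, ih, hF, List.mem_cons]
    constructor
    · rintro ((hx | hp) | ⟨a', ha', hp⟩)
      · tauto
      · exact Or.inr ⟨a, Or.inl rfl, hp⟩
      · exact Or.inr ⟨a', Or.inr ha', hp⟩
    · rintro (hx | ⟨a', (rfl | ha'), hp⟩) <;> tauto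

-- the gram set built for one line contains a stone of admitted length iff the stone occurs in the line
lemma gram_iff (stone line : String) (lens : List Int)
    (hmem : ((stone.toList.length : Int)) ∈ lens)
    (hnn : ∀ k ∈ lens, 0 ≤ k) :
    (∃ k ∈ lens, ∃ i ∈ PySem.List.pyRange 0 (PySem.Str.len line - k + 1) 1,
        stone = PySem.Str.slice line (some i) (some (i + k)))
      ↔ PySem.Str.isIn stone line = true := by
  rw [PySem.Str.isIn_iff_infix]
  constructor
  · rintro ⟨k, hk, i, hi, rfl⟩
    have h0 : (0 : Int) ≤ i := (PySem.List.mem_pyRange_one.1 hi).1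
    have hk0 : (0 : Int) ≤ k := hnn k hk
    rw [PySem.Str.toList_slice, PySem.Chars.slice_eq_listSlice,
        PySem.List.slice_toNat _ h0 (by omega)]
    exact (List.take_prefix _ _).isInfix.trans (List.drop_suffix _ _).isInfix
  · rintro ⟨pre, suf, hps⟩
    have hlen : line.toList.length = pre.length + stone.toList.length + suf.length := by
      rw [← hps]; simp; omega
    refine ⟨(stone.toList.length : Int), hmem, (pre.length : Int), ?_, ?_⟩
    · rw [PySem.List.mem_pyRange_one, PySem.Str.len_eq]
      constructor
      · positivity
      · omega
    · rw [← String.toList_inj, PySem.Str.toList_slice, PySem.Chars.slice_eq_listSlice,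
          PySem.List.slice_natCast_add, ← hps, List.append_assoc, List.drop_left,
          List.take_left]

theorem solve_word_search_spec : Claim_equal_solve_word_search := by
  intro data _
  show _ = _
  unfold solve_word_search solve_word_search_alt
  simp only [foldl_append_if_eq_filter, List.nil_append]
  congr 2
  apply List.filter_congr
  intro x hx
  rw [pvScanA_eq_any, Bool.eq_iff_iff, List.any_eq_true, PySem.Set.contains_iff]
  rw [mem_foldl_step
      (P := fun line x => ∃ k ∈ PySem.Set.ofList (INFINITY_STONES.map (fun s => PySem.Str.len s)),
        ∃ i ∈ PySem.List.pyRange 0 (PySem.Str.len line - k + 1) 1,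
          x = PySem.Str.slice line (some i) (some (i + k)))]
  · have hmem : ((x.toList.length : Int)) ∈
        PySem.Set.ofList (INFINITY_STONES.map (fun s => PySem.Str.len s)) := by
      rw [PySem.Set.mem_ofList]
      exact List.mem_map.2 ⟨x, hx, (PySem.Str.len_eq x).symm⟩
    have hnn : ∀ k ∈ PySem.Set.ofList (INFINITY_STONES.map (fun s => PySem.Str.len s)),
        (0 : Int) ≤ k := by
      intro k hk
      rw [PySem.Set.mem_ofList] at hk
      obtain ⟨s, _, rfl⟩ := List.mem_map.1 hk
      rw [PySem.Str.len_eq]; positivity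
    constructor
    · rintro ⟨l, hl, hp⟩
      exact Or.inr ⟨l, hl, (gram_iff x l _ hmem hnn).2 hp⟩
    · rintro (h | ⟨l, hl, hp⟩)
      · simp [PySem.Set.empty] at h
      · exact ⟨l, hl, (gram_iff x l _ hmem hnn).1 hp⟩
  · intro s a y
    rw [mem_foldl_step
        (P := fun k y => ∃ i ∈ PySem.List.pyRange 0 (PySem.Str.len a - k + 1) 1,
          y = PySem.Str.slice a (some i) (some (i + k)))]
    intro s' k y'
    rw [mem_foldl_step (P := fun i y' => y' = PySem.Str.slice a (some i) (some (i + k)))]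
    intro s'' i y''
    exact PySem.Set.mem_add s'' _ y''
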